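-- pv_equiv track=rewrite | github.com/yongqiangzheng/PAHAN-ABSA | data_load.py | get_y_sequence
-- ===== SOURCE A (Python) =====
-- def get_y_sequence(rows):
--     sequence = []
--     for row in rows:
--         for index, y in enumerate(row):
--             if y == max(row):
--                 sequence.append(index)
--                 break
--     return sequence
-- ===== SOURCE B (Python) =====
-- def get_y_sequence(rows):
--     sequence = []
--     for row in rows:
--         if row:
--             best_val = row[0]
--             best_idx = 0
--             i = 1
--             for y in row[1:]:
--                 if y > best_val:
--                     best_val = y
--                     best_idx = i
--                 i += 1
--             sequence.append(best_idx)
--     return sequence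
-- ===== Notes on version B (the rewrite author's own statement) =====
-- stated objective: alternative
-- what changed: Replaces A's per-element recomputation of max(row) inside the scan (quadratic per row) with a single forward pass per row that keeps a running best value and its first index.
import Mathlib
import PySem

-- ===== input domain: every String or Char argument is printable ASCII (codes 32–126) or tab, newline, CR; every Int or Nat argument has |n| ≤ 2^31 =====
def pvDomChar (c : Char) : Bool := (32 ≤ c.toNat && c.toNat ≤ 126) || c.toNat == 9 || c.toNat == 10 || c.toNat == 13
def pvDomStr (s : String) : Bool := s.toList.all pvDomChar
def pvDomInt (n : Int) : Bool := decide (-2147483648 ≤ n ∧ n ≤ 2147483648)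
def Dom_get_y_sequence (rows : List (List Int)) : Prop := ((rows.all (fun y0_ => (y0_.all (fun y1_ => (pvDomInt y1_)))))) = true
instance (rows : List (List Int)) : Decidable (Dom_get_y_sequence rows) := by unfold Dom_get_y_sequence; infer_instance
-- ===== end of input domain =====

-- B replaces A's per-element max(row) recomputation with a single running-best scan per row (a different, single-pass algorithm).

-- ===== PORT A =====
-- inner 'for index, y in enumerate(row): if y == max(row): append index; break'
def aFind (full : List Int) (idx : Int) : List Int → Option Int
  | [] => none
  | y :: ys =>
    if some y = PySem.List.max? full (fun x => x) then some idx
    else aFind full (idx + 1) ys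

def get_y_sequence (rows : List (List Int)) : List Int :=
  rows.foldl (fun sequence row =>
    match aFind row 0 row with
    | some i => sequence ++ [i]
    | none => sequence) []

-- ===== PORT B =====
-- running best value / first best index scan
def bScan (best bidx i : Int) : List Int → Int
  | [] => bidx
  | y :: ys => if best < y then bScan y i (i + 1) ys else bScan best bidx (i + 1) ys

def get_y_sequence_alt (rows : List (List Int)) : List Int :=
  rows.foldl (fun sequence row =>
    match row with
    | [] => sequence
    | h :: t => sequence ++ [bScan h 0 1 t]) []

-- ===== PRECONDITION & SPEC =====
def Spec_get_y_sequence (rows : List (List Int)) (out : List Int) : Prop := out = get_y_sequence_alt rows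
instance (rows : List (List Int)) (out : List Int) : Decidable (Spec_get_y_sequence rows out) := by unfold Spec_get_y_sequence; infer_instance

-- ===== CLAIM (what is proved, stated in full; the proofs are below) =====
def Claim_equal_get_y_sequence : Prop := ∀ (rows : List (List Int)), Dom_get_y_sequence rows → Spec_get_y_sequence rows (get_y_sequence rows)

-- ===== LEMMAS AND PROOFS =====

theorem foldl_max_eq_of_le (t : List Int) (a : Int) (h : ∀ y ∈ t, y ≤ a) :
    t.foldl max a = a := by
  have hm := PySem.List.foldl_max_mem t a
  have hle := (PySem.List.le_foldl_max t a).1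
  rcases hm with hm | hm
  · exact hm
  · exact le_antisymm (h _ hm) hle

theorem aFind_go (m : Int) (full : List Int)
    (hm : PySem.List.max? full (fun x => x) = some m) :
    ∀ (l : List Int) (idx : Int), m ∈ l →
      aFind full idx l = some (idx + (l.findIdx (fun y => y == m) : Int)) := by
  intro l
  induction l with
  | nil => intro idx h; exact absurd h (List.not_mem_nil)
  | cons y ys ih =>
    intro idx h
    by_cases hy : y = m
    · simp [aFind, hm, hy, List.findIdx_cons]
    · have hmem : m ∈ ys := by
        rcases List.mem_cons.mp h with h1 | h1
        · exact absurd h1.symm hy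
        · exact h1
      have : ¬ some y = PySem.List.max? full (fun x => x) := by
        rw [hm]; simp [hy]
      simp only [aFind, if_neg this, ih (idx + 1) hmem, List.findIdx_cons]
      have : (y == m) = false := by simp [hy]
      rw [this]
      simp only [cond_false]
      congr 1
      push_cast
      ring

theorem bScan_eq : ∀ (t : List Int) (best bidx i : Int),
    bScan best bidx i t =
      if ∀ y ∈ t, y ≤ best then bidx
      else i + ((t.findIdx (fun y => y == t.foldl max best)) : Int) := by
  intro t
  induction t with
  | nil => intro best bidx i; simp [bScan]
  | cons y ys ih =>
    intro best bidx i
    have hfold : (y :: ys).foldl max best = ys.foldl max (max best y) := rfl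
    by_cases hy : best < y
    · have hmaxby : max best y = y := max_eq_right hy.le
      have hcond : ¬ (∀ z ∈ (y :: ys), z ≤ best) := by
        intro h; exact absurd (h y (List.mem_cons_self)) (not_le.mpr hy)
      rw [if_neg hcond]
      have hL : bScan best bidx i (y :: ys) = bScan y i (i + 1) ys := by
        simp [bScan, hy]
      rw [hL, ih]
      by_cases hall : ∀ z ∈ ys, z ≤ y
      · have hM : ys.foldl max y = y := foldl_max_eq_of_le ys y hall
        rw [if_pos hall, hfold, hmaxby, hM, List.findIdx_cons]
        simp
      · push_neg at hall
        obtain ⟨z, hz, hzy⟩ := hall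
        have hzM : z ≤ ys.foldl max y := (PySem.List.le_foldl_max ys y).2 z hz
        have hyM : y ≠ ys.foldl max y := by omega
        rw [if_neg (by push_neg; exact ⟨z, hz, hzy⟩), hfold, hmaxby, List.findIdx_cons]
        have hb : (y == ys.foldl max y) = false := by simp [hyM]
        rw [hb]
        simp only [cond_false]
        push_cast
        ring
    · have hyb : y ≤ best := not_lt.mp hy
      have hmaxby : max best y = best := max_eq_left hyb
      have hL : bScan best bidx i (y :: ys) = bScan best bidx (i + 1) ys := by
        simp [bScan, hy]
      rw [hL, ih, hfold, hmaxby]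
      by_cases hall : ∀ z ∈ ys, z ≤ best
      · rw [if_pos hall, if_pos (by
          intro z hz
          rcases List.mem_cons.mp hz with h1 | h1
          · exact h1 ▸ hyb
          · exact hall z h1)]
      · push_neg at hall
        obtain ⟨z, hz, hzb⟩ := hall
        have hzM : z ≤ ys.foldl max best := (PySem.List.le_foldl_max ys best).2 z hz
        have hyM : y ≠ ys.foldl max best := by omega
        rw [if_neg (by push_neg; exact ⟨z, hz, hzb⟩),
            if_neg (by push_neg; exact ⟨z, List.mem_cons_of_mem _ hz, hzb⟩),
            List.findIdx_cons]
        have hb : (y == ys.foldl max best) = false := by simp [hyM]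
        rw [hb]
        simp only [cond_false]
        push_cast
        ring

theorem row_eq (h : Int) (t : List Int) :
    aFind (h :: t) 0 (h :: t) = some (bScan h 0 1 t) := by
  have hm : PySem.List.max? (h :: t) (fun x => x) = some (t.foldl max h) :=
    PySem.List.max?_id_cons h t
  have hmem : t.foldl max h ∈ h :: t := by
    rcases PySem.List.foldl_max_mem t h with hx | hx
    · rw [hx]; exact List.mem_cons_self
    · exact List.mem_cons_of_mem _ hx
  rw [aFind_go (t.foldl max h) (h :: t) hm (h :: t) 0 hmem, bScan_eq]
  by_cases hall : ∀ z ∈ t, z ≤ h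
  · have hM : t.foldl max h = h := foldl_max_eq_of_le t h hall
    rw [if_pos hall, List.findIdx_cons, hM]
    simp
  · push_neg at hall
    obtain ⟨z, hz, hzh⟩ := hall
    have hzM : z ≤ t.foldl max h := (PySem.List.le_foldl_max t h).2 z hz
    have hyM : h ≠ t.foldl max h := by omega
    rw [if_neg (by push_neg; exact ⟨z, hz, hzh⟩), List.findIdx_cons]
    have hb : (h == t.foldl max h) = false := by simp [hyM]
    rw [hb]
    simp only [cond_false, Option.some.injEq]
    push_cast
    ring

theorem foldl_rows_eq : ∀ (rows : List (List Int)) (acc : List Int),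
    rows.foldl (fun sequence row =>
      match aFind row 0 row with
      | some i => sequence ++ [i]
      | none => sequence) acc =
    rows.foldl (fun sequence row =>
      match row with
      | [] => sequence
      | h :: t => sequence ++ [bScan h 0 1 t]) acc := by
  intro rows
  induction rows with
  | nil => intro acc; rfl
  | cons r rs ih =>
    intro acc
    match r with
    | [] => simpa [List.foldl_cons, aFind] using ih acc
    | h :: t =>
      simp only [List.foldl_cons, row_eq h t]
      exact ih _

-- ===== VERDICT (by name: the statement is the Claim_ definition above) =====
theorem get_y_sequence_spec : Claim_equal_get_y_sequence := by
  intro rows _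
  unfold Spec_get_y_sequence get_y_sequence get_y_sequence_alt
  exact foldl_rows_eq rows []
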